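-- pv_equiv track=rewrite | github.com/Roxabi/lyra | scripts/dep-graph/v5/data/corpus.py | _project_lane_size
-- ===== SOURCE A (Python) =====
-- LANE_LABEL_PREFIX = "graph:lane/"
--
-- SIZE_LABEL_PREFIX = "size:"
--
-- def _project_lane_size(labels: list[str]) -> tuple[str | None, str | None]:
--     """Project lane_label + size from a label list.
--
--     SINGLE SWAP POINT for the cross-repo taxonomy migration:
--       1. `Roxabi/roxabi-plugins#119` enrolls every issue in the Roxabi Hub
--          Project V2 and backfills the Lane/Size single-select fields.
--       2. `Roxabi/lyra#872` then extends corpus.db with `lane` / `size`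
--          columns pulled from `projectV2.items`, and flips the body of this
--          function to read those columns instead of the label prefixes.
--
--     Do NOT inline this function into load_issues — the indirection is the
--     point; the whole migration is one function's worth of code change.
--     """
--     lane: str | None = None
--     size: str | None = None
--
--     for lbl in labels:
--         if lane is None and lbl.startswith(LANE_LABEL_PREFIX):
--             lane = lbl[len(LANE_LABEL_PREFIX):]
--         if size is None and lbl.startswith(SIZE_LABEL_PREFIX):
--             size = lbl[len(SIZE_LABEL_PREFIX):]
--         if lane is not None and size is not None:
--             break
--
--     return lane, size
-- ===== SOURCE B (Python) =====
-- LANE_LABEL_PREFIX = "graph:lane/"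
--
-- SIZE_LABEL_PREFIX = "size:"
--
-- def _project_lane_size(labels):
--     lane = next((lbl[len(LANE_LABEL_PREFIX):] for lbl in labels
--                  if lbl.startswith(LANE_LABEL_PREFIX)), None)
--     size = next((lbl[len(SIZE_LABEL_PREFIX):] for lbl in labels
--                  if lbl.startswith(SIZE_LABEL_PREFIX)), None)
--     return lane, size
-- ===== Notes on version B (the rewrite author's own statement) =====
-- stated objective: idiomatic
-- what changed: A's single interleaved early-exit loop maintaining both lane/size states is replaced by two independent first-match generator searches (next(...)), one per field.
import Mathlib
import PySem

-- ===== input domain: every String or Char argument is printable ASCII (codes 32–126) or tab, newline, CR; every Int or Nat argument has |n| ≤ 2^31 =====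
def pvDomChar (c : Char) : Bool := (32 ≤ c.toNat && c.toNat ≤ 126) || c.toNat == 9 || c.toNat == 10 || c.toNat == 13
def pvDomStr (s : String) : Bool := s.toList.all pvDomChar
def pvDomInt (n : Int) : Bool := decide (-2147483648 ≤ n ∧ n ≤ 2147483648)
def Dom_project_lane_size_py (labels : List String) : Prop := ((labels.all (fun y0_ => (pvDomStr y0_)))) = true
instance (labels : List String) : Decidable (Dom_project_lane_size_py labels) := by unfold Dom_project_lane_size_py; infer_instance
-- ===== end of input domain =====

-- B replaces A's single interleaved early-exit loop by two independent first-match scans (idiomatic decomposition).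

def lanePrefix : String := "graph:lane/"
def sizePrefix : String := "size:"

-- ===== PORT A =====
-- A's for-loop over labels carrying (lane, size) state with early break once both are found
def pyLoopA : List String → Option String → Option String → Option String × Option String
  | [], lane, size => (lane, size)
  | lbl :: rest, lane, size =>
    let lane' := if lane.isNone && PySem.Str.startswith lbl lanePrefix then
        some (PySem.Str.slice lbl (some (PySem.Str.len lanePrefix)) none) else lane
    let size' := if size.isNone && PySem.Str.startswith lbl sizePrefix then
        some (PySem.Str.slice lbl (some (PySem.Str.len sizePrefix)) none) else size
    if lane'.isSome && size'.isSome then (lane', size') else pyLoopA rest lane' size'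

def project_lane_size_py (labels : List String) : Option String × Option String :=
  pyLoopA labels none none

-- ===== PORT B =====
-- first label starting with p, stripped of p; none if absent  (one next(...) search)
def findStrip (p : String) : List String → Option String
  | [] => none
  | lbl :: rest =>
    if PySem.Str.startswith lbl p then
      some (PySem.Str.slice lbl (some (PySem.Str.len p)) none)
    else findStrip p rest

def project_lane_size_py_alt (labels : List String) : Option String × Option String :=
  (findStrip lanePrefix labels, findStrip sizePrefix labels)

-- ===== PRECONDITION & SPEC =====
def Spec_project_lane_size_py (labels : List String) (out : Option String × Option String) : Prop := out = project_lane_size_py_alt labels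
instance (labels : List String) (out : Option String × Option String) : Decidable (Spec_project_lane_size_py labels out) := by unfold Spec_project_lane_size_py; infer_instance

-- ===== CLAIM (what is proved, stated in full; the proofs are below) =====
def Claim_equal_project_lane_size_py : Prop := ∀ (labels : List String), Dom_project_lane_size_py labels → Spec_project_lane_size_py labels (project_lane_size_py labels)

-- ===== LEMMAS AND PROOFS =====

-- invariant characterising A's loop: the carried state wins, otherwise the first match of the rest
theorem pyLoopA_eq (labels : List String) : ∀ (lane size : Option String),
    pyLoopA labels lane size =
      (lane.orElse (fun _ => findStrip lanePrefix labels),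
       size.orElse (fun _ => findStrip sizePrefix labels)) := by
  induction labels with
  | nil => intro lane size; cases lane <;> cases size <;> simp [pyLoopA, findStrip]
  | cons lbl rest ih =>
    intro lane size
    cases lane <;> cases size <;>
      simp [pyLoopA, findStrip, ih] <;> split_ifs <;> simp_all

-- ===== VERDICT (by name: the statement is the Claim_ definition above) =====
theorem project_lane_size_py_spec : Claim_equal_project_lane_size_py := by
  intro labels _
  unfold Spec_project_lane_size_py project_lane_size_py project_lane_size_py_alt
  simp [pyLoopA_eq]
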